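-- pv_equiv track=rewrite | github.com/yousirong/ADP-DiT | adpdit/utils/progression_utils.py | group_by_patient
-- ===== SOURCE A (Python) =====
-- from typing import List, Tuple, Dict
--
-- def is_first_visit(prompt: str) -> bool:
--     """
--     Check if prompt indicates first visit (NOT a follow-up visit).
--
--     Args:
--         prompt: Text prompt
--
--     Returns:
--         True if first visit (without months indicator), False otherwise
--     """
--     prompt_lower = prompt.lower()
--     # Must contain "first visit" but NOT "months from first visit"
--     if "first visit" in prompt_lower:
--         # Check if it's a follow-up (contains "months from first visit" or "month from first visit")
--         if "months from first visit" in prompt_lower or "month from first visit" in prompt_lower: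
--             return False
--         # Otherwise, it's a true first visit
--         return True
--     return False
--
-- def group_by_patient(data_rows: List[Tuple]) -> List[List[Tuple]]:
--     """
--     Group data rows by patient (consecutive rows until next 'first visit').
--
--     Args:
--         data_rows: List of (input_image, edited_image, edit_prompt) tuples
--
--     Returns:
--         List of patient groups, where each group is a list of visits for that patient
--     """
--     patients = []
--     current_patient = []
--
--     for row in data_rows:
--         input_img, edited_img, prompt = row
--
--         if is_first_visit(prompt):
--             # Start of new patient
--             if current_patient:
--                 patients.append(current_patient)
--             current_patient = [row]
--         else:
--             # Continuation of current patient
--             current_patient.append(row)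
--
--     # Don't forget the last patient
--     if current_patient:
--         patients.append(current_patient)
--
--     return patients
-- ===== SOURCE B (Python) =====
-- def is_first_visit(prompt: str) -> bool:
--     prompt_lower = prompt.lower()
--     if "first visit" in prompt_lower:
--         if "months from first visit" in prompt_lower or "month from first visit" in prompt_lower:
--             return False
--         return True
--     return False
--
--
-- def group_by_patient(data_rows):
--     # Two-pointer over precomputed prompts: each group is the slice from its
--     # start to the next 'first visit' boundary.
--     prompts = [prompt for _input_img, _edited_img, prompt in data_rows]
--     groups = []
--     n = len(data_rows)
--     i = 0
--     while i < n:
--         j = i + 1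
--         while j < n and not is_first_visit(prompts[j]):
--             j += 1
--         groups.append(data_rows[i:j])
--         i = j
--     return groups
-- ===== Notes on version B (the rewrite author's own statement) =====
-- stated objective: alternative
-- what changed: Replaces A's single-pass accumulate-and-flush (append rows to a current group, flush it at each first-visit marker and at the end) by a two-pointer scan over precomputed prompts that finds each group's end boundary and emits the slice data_rows[i:j] per group.
import Mathlib
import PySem

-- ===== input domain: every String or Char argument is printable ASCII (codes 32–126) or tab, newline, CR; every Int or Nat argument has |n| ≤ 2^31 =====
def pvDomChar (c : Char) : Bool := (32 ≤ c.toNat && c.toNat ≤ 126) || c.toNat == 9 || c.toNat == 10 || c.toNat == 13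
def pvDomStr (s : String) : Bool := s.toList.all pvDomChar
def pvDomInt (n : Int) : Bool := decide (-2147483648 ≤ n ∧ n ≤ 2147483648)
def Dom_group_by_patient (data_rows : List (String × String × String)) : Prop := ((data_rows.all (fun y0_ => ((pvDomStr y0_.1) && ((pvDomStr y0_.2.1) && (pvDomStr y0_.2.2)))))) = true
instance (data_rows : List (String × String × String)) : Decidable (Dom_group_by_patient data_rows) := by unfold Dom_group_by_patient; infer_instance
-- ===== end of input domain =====

-- B replaces A's accumulate-and-flush single pass by a two-pointer scan that slices
-- the input between consecutive 'first visit' boundaries (objective: alternative).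

-- ===== PORT A =====
def is_first_visit (prompt : String) : Bool :=
  let prompt_lower := PySem.Str.lower prompt
  if PySem.Str.isIn "first visit" prompt_lower then
    if PySem.Str.isIn "months from first visit" prompt_lower
        || PySem.Str.isIn "month from first visit" prompt_lower then
      false
    else
      true
  else
    false

def group_by_patient (data_rows : List (String × String × String)) : List (List (String × String × String)) :=
  let st := data_rows.foldl
    (fun (st : List (List (String × String × String)) × List (String × String × String)) row =>
      let patients := st.1
      let current_patient := st.2
      if is_first_visit row.2.2 then
        ((if current_patient ≠ [] then patients ++ [current_patient] else patients), [row])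
      else
        (patients, current_patient ++ [row]))
    ([], [])
  if st.2 ≠ [] then st.1 ++ [st.2] else st.1

-- ===== PORT B =====
-- inner while loop: advance j while j < n and prompts[j] is not a first visit
-- (prompts.getD j "" is exact here: the guard j < n keeps the index in range)
def gbpScan (prompts : List String) (n j : Nat) : Nat :=
  if j < n then
    if is_first_visit (prompts.getD j "") then j else gbpScan prompts n (j + 1)
  else j
termination_by n - j

theorem gbpScan_lower (prompts : List String) (n j : Nat) : j ≤ gbpScan prompts n j := by
  rw [gbpScan]
  split_ifs with h1 h2
  · omega
  · have := gbpScan_lower prompts n (j + 1)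
    omega
  · omega
termination_by n - j

-- outer while loop: emit the slice data_rows[i:j] for each group
def gbpOuter (rows : List (String × String × String)) (prompts : List String) (n i : Nat)
    (groups : List (List (String × String × String))) : List (List (String × String × String)) :=
  if i < n then
    let j := gbpScan prompts n (i + 1)
    gbpOuter rows prompts n j (groups ++ [PySem.List.slice rows (some (i : Int)) (some (j : Int))])
  else groups
termination_by n - i
decreasing_by
  have := gbpScan_lower prompts n (i + 1)
  omega

def group_by_patient_alt (data_rows : List (String × String × String)) : List (List (String × String × String)) :=
  let prompts := data_rows.map (fun r => r.2.2)
  let n := data_rows.length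
  gbpOuter data_rows prompts n 0 []

-- ===== PRECONDITION & SPEC =====
def Spec_group_by_patient (data_rows : List (String × String × String)) (out : List (List (String × String × String))) : Prop := out = group_by_patient_alt data_rows
instance (data_rows : List (String × String × String)) (out : List (List (String × String × String))) : Decidable (Spec_group_by_patient data_rows out) := by unfold Spec_group_by_patient; infer_instance

-- ===== CLAIM (what is proved, stated in full; the proofs are below) =====
def Claim_equal_group_by_patient : Prop := ∀ (data_rows : List (String × String × String)), Dom_group_by_patient data_rows → Spec_group_by_patient data_rows (group_by_patient data_rows)

-- ===== LEMMAS AND PROOFS =====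

-- the common characterisation: a group is its starting row followed by the
-- maximal run of non-first-visit rows
def specGroups : List (String × String × String) → List (List (String × String × String))
  | [] => []
  | r :: rs =>
      (r :: rs.takeWhile (fun x => !is_first_visit x.2.2)) ::
        specGroups (rs.dropWhile (fun x => !is_first_visit x.2.2))
termination_by l => l.length
decreasing_by
  have := List.length_dropWhile_le (fun x : String × String × String => !is_first_visit x.2.2) rs
  simp only [List.length_cons]
  omega

-- ---- A = specGroups ----
theorem A_fold_eq (rows : List (String × String × String)) :
    ∀ (ps : List (List (String × String × String))) (cur : List (String × String × String)),
      (let st := rows.foldl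
          (fun (st : List (List (String × String × String)) × List (String × String × String)) row =>
            let patients := st.1
            let current_patient := st.2
            if is_first_visit row.2.2 then
              ((if current_patient ≠ [] then patients ++ [current_patient] else patients), [row])
            else
              (patients, current_patient ++ [row]))
          (ps, cur)
        if st.2 ≠ [] then st.1 ++ [st.2] else st.1)
      = ps ++ (if cur ++ rows.takeWhile (fun x => !is_first_visit x.2.2) = [] then [] else
                [cur ++ rows.takeWhile (fun x => !is_first_visit x.2.2)]) ++
          specGroups (rows.dropWhile (fun x => !is_first_visit x.2.2)) := by
  induction rows with
  | nil =>
      intro ps cur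
      by_cases h : cur = [] <;> simp [specGroups, h]
  | cons r rs ih =>
      intro ps cur
      by_cases hf : is_first_visit r.2.2
      · simp only [List.foldl_cons, if_true, List.takeWhile_cons, List.dropWhile_cons,
          hf, Bool.not_true, Bool.false_eq_true, if_false]
        rw [ih]
        rw [specGroups]
        by_cases h : cur = [] <;> simp [h]
      · simp only [List.foldl_cons, List.takeWhile_cons, List.dropWhile_cons,
          Bool.not_false, hf]
        rw [ih]
        simp

theorem A_eq_spec (rows : List (String × String × String)) :
    group_by_patient rows = specGroups rows := by
  have h := A_fold_eq rows [] []
  simp only [List.nil_append] at h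
  rw [group_by_patient]
  rw [h]
  cases rows with
  | nil => simp [specGroups]
  | cons r rs =>
      by_cases hf : is_first_visit r.2.2
      · simp [hf]
      · rw [specGroups]
        simp [hf]

-- ---- B = specGroups ----
theorem take_length_takeWhile {α : Type} (p : α → Bool) (l : List α) :
    l.take (l.takeWhile p).length = l.takeWhile p := by
  induction l with
  | nil => simp
  | cons a l ih =>
      by_cases h : p a <;> simp [h, ih]

theorem drop_length_takeWhile {α : Type} (p : α → Bool) (l : List α) :
    l.drop (l.takeWhile p).length = l.dropWhile p := by
  induction l with
  | nil => simp
  | cons a l ih =>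
      by_cases h : p a <;> simp [h, ih]

theorem gbpScan_eq (prompts : List String) :
    ∀ (d j : Nat), prompts.length - j ≤ d →
      gbpScan prompts prompts.length j
        = j + ((prompts.drop j).takeWhile (fun p => !is_first_visit p)).length := by
  intro d
  induction d with
  | zero =>
      intro j hj
      have hjn : prompts.length ≤ j := by omega
      rw [gbpScan]
      simp [Nat.not_lt.mpr hjn, List.drop_eq_nil_of_le hjn]
  | succ d ih =>
      intro j hj
      by_cases hjn : j < prompts.length
      · rw [gbpScan]
        have hdrop : prompts.drop j = prompts[j] :: prompts.drop (j + 1) :=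
          List.drop_eq_getElem_cons hjn
        have hgd : prompts.getD j "" = prompts[j] := List.getD_eq_getElem prompts "" hjn
        rw [if_pos hjn, hgd, hdrop]
        by_cases hf : is_first_visit prompts[j]
        · rw [if_pos hf, List.takeWhile_cons_of_neg (by simp [hf])]
          simp
        · rw [if_neg hf, List.takeWhile_cons_of_pos (by simp [hf]),
            ih (j + 1) (by omega)]
          simp
          omega
      · rw [gbpScan]
        simp [hjn, List.drop_eq_nil_of_le (by omega : prompts.length ≤ j)]

theorem gbpOuter_eq (rows : List (String × String × String)) :
    ∀ (d i : Nat) (groups : List (List (String × String × String))), rows.length - i ≤ d →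
      gbpOuter rows (rows.map (fun r => r.2.2) ) rows.length i groups
        = groups ++ specGroups (rows.drop i) := by
  intro d
  induction d with
  | zero =>
      intro i groups hi
      have hin : rows.length ≤ i := by omega
      rw [gbpOuter]
      simp [Nat.not_lt.mpr hin, List.drop_eq_nil_of_le hin, specGroups]
  | succ d ih =>
      intro i groups hi
      by_cases hin : i < rows.length
      · rw [gbpOuter]
        simp only [hin, if_true]
        set q : String × String × String → Bool := fun x => !is_first_visit x.2.2 with hq
        have hscan : gbpScan (rows.map (fun r => r.2.2)) rows.length (i + 1)
            = (i + 1) + ((rows.drop (i + 1)).takeWhile q).length := by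
          rw [show rows.length = (rows.map (fun r => r.2.2)).length by simp,
            gbpScan_eq (rows.map (fun r => r.2.2)) (rows.map (fun r => r.2.2)).length (i + 1)
              (by omega)]
          rw [← List.map_drop, List.takeWhile_map]
          simp [hq, Function.comp_def]
        set t := ((rows.drop (i + 1)).takeWhile q).length with ht
        have hdrop : rows.drop i = rows[i] :: rows.drop (i + 1) := List.drop_eq_getElem_cons hin
        have hslice : PySem.List.slice rows (some (i : Int))
              (some ((gbpScan (rows.map (fun r => r.2.2)) rows.length (i + 1) : Nat) : Int))
            = rows[i] :: (rows.drop (i + 1)).takeWhile q := by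
          rw [hscan, PySem.List.slice_natCast, hdrop]
          rw [show i + 1 + t - i = t + 1 from by omega, List.take_succ_cons, ht,
            take_length_takeWhile]
        have hrec : rows.length - gbpScan (rows.map (fun r => r.2.2)) rows.length (i + 1) ≤ d := by
          rw [hscan]; omega
        rw [ih _ _ hrec, hslice]
        have hdropj : rows.drop (gbpScan (rows.map (fun r => r.2.2)) rows.length (i + 1))
            = (rows.drop (i + 1)).dropWhile q := by
          rw [hscan, ← List.drop_drop, ht, drop_length_takeWhile]
        rw [hdropj]
        conv_rhs => rw [hdrop, specGroups]
        simp [hq]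
      · rw [gbpOuter]
        simp [hin, List.drop_eq_nil_of_le (by omega : rows.length ≤ i), specGroups]

theorem B_eq_spec (rows : List (String × String × String)) :
    group_by_patient_alt rows = specGroups rows := by
  rw [group_by_patient_alt]
  have := gbpOuter_eq rows rows.length 0 [] (by omega)
  simpa using this

-- ===== VERDICT (by name: the statement is the Claim_ definition above) =====
theorem group_by_patient_spec : Claim_equal_group_by_patient := by
  intro rows _dom
  unfold Spec_group_by_patient
  rw [A_eq_spec, B_eq_spec]
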